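-- pv_equiv track=rewrite | github.com/PierreVieira/AEDS-I-Python | Fatorial de numeros grandes.py | solveThis
-- ===== SOURCE A (Python) =====
-- def solveThis(numero_em_questao, lista_resultado, tamanho):
--     resultado = 0
--     counter = 0
--     for c in range(tamanho+1):
--         op = lista_resultado[c]*numero_em_questao + resultado
--         resultado = op//10
--         lista_resultado[c] = op%10
--         counter += 1
--     while resultado != 0:
--         lista_resultado.append(resultado%10)
--         resultado //= 10
--         counter += 1
--     counter -= 1
--     return counter
-- ===== SOURCE B (Python) =====
-- def _spread(v, lista):
--     # append the digits of v (least significant first) recursively; return how many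
--     if v == 0:
--         return 0
--     lista.append(v % 10)
--     return 1 + _spread(v // 10, lista)
--
--
-- def solveThis(numero_em_questao, lista_resultado, tamanho):
--     n = max(tamanho + 1, 0)
--     value = numero_em_questao * sum(d * 10 ** c for c, d in enumerate(lista_resultado[:n]))
--     low, high = value % 10 ** n, value // 10 ** n
--     lista_resultado[:n] = [low // 10 ** c % 10 for c in range(n)]
--     return n + _spread(high, lista_resultado) - 1
-- ===== Notes on version B (the rewrite author's own statement) =====
-- stated objective: alternative
-- what changed: A propagates a carry digit-by-digit and then strips extra digits with a while loop; B reconstructs the whole integer as a comprehension sum of digit*10**c, multiplies once, splits the product by divmod with 10**n, writes the low digits back by the direct formula low//10**c%10, and counts/appends the leftover high digits with a small recursive helper.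
import Mathlib
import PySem

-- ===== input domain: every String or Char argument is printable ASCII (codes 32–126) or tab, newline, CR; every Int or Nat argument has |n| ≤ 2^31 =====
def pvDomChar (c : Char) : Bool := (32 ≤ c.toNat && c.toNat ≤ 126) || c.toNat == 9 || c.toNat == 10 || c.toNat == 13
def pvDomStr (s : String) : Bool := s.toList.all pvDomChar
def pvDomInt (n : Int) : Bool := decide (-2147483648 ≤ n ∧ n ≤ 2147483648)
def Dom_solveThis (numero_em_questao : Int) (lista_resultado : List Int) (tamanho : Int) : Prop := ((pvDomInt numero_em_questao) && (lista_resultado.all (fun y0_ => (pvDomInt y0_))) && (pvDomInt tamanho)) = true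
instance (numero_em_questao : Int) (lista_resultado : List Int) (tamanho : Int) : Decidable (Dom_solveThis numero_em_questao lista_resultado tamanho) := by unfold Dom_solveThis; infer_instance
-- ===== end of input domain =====

-- B replaces A's per-digit carry propagation and trailing while-loop by: one comprehension
-- sum reconstructing the integer, one big multiply, a divmod split at 10**n, a direct
-- digit formula for the write-back, and a recursive helper that counts the extra digits.
-- B performs the same in-place mutation of lista_resultado as A on Pre_; the theorems
-- below are about the return value.

-- ===== PORT A =====
-- the 'while resultado != 0' loop of A; Python diverges for resultado < 0 (excluded by
-- Pre_), so the guard '0 < r' only makes the same computation total.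
def carryLoopA (r counter : Int) (l : List Int) : Int :=
  if _h : 0 < r then
    carryLoopA (PySem.Int.floordiv r 10) (counter + 1) (l ++ [PySem.Int.mod r 10])
  else counter
termination_by r.toNat
decreasing_by
  have h10 : PySem.Int.floordiv r 10 = r / 10 := PySem.Int.floordiv_eq_ediv_of_pos (by norm_num)
  rw [h10]; omega

-- for c in range(tamanho+1): carry step, write digit, count  (state: resultado, lista, counter)
def mainLoopA (numero_em_questao : Int) (lista_resultado : List Int) (tamanho : Int) :
    Int × List Int × Int :=
  (PySem.List.pyRange 0 (tamanho + 1) 1).foldl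
    (fun (st : Int × List Int × Int) c =>
      let op := PySem.List.pyGetD st.2.1 c 0 * numero_em_questao + st.1
      (PySem.Int.floordiv op 10,
       PySem.List.pySetD st.2.1 c (PySem.Int.mod op 10),
       st.2.2 + 1))
    (0, lista_resultado, 0)

def solveThis (numero_em_questao : Int) (lista_resultado : List Int) (tamanho : Int) : Int :=
  carryLoopA (mainLoopA numero_em_questao lista_resultado tamanho).1
    (mainLoopA numero_em_questao lista_resultado tamanho).2.2
    (mainLoopA numero_em_questao lista_resultado tamanho).2.1 - 1

-- ===== PORT B =====
-- _spread(v, lista): append the digits of v recursively, return how many; Python hits the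
-- recursion limit for v < 0 (excluded by Pre_), so '0 < v' only makes it total.
def spreadB (v : Int) (lista : List Int) : Int :=
  if _h : 0 < v then
    1 + spreadB (PySem.Int.floordiv v 10) (lista ++ [PySem.Int.mod v 10])
  else 0
termination_by v.toNat
decreasing_by
  have h10 : PySem.Int.floordiv v 10 = v / 10 := PySem.Int.floordiv_eq_ediv_of_pos (by norm_num)
  rw [h10]; omega

def solveThis_alt (numero_em_questao : Int) (lista_resultado : List Int) (tamanho : Int) : Int :=
  -- n = max(tamanho + 1, 0)
  let n : Int := max (tamanho + 1) 0
  -- value = numero * sum(d * 10**c for c, d in enumerate(lista[:n]))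
  let value : Int := numero_em_questao *
    (PySem.List.enumerate (PySem.List.slice lista_resultado none (some n)) 0).foldl
      (fun acc p => acc + p.2 * 10 ^ p.1.toNat) 0
  -- low, high = value % 10**n, value // 10**n
  let low : Int := PySem.Int.mod value (10 ^ n.toNat)
  let high : Int := PySem.Int.floordiv value (10 ^ n.toNat)
  -- lista[:n] = [low // 10**c % 10 for c in range(n)]  (the list B mutates; _spread appends to it)
  let lista' : List Int :=
    ((PySem.List.pyRange 0 n 1).map
      (fun c => PySem.Int.mod (PySem.Int.floordiv low (10 ^ c.toNat)) 10)) ++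
    PySem.List.slice lista_resultado (some n) none
  -- return n + _spread(high, lista) - 1
  n + spreadB high lista' - 1

-- ===== PRECONDITION & SPEC =====
-- value of the first m digit slots (used by Pre_ and the proofs; reaches no port)
def pvP : Nat → Int
  | 0 => 1
  | m + 1 => pvP m * 10

def pvS (l : List Int) : Nat → Int
  | 0 => 0
  | m + 1 => pvS l m + l.getD m 0 * pvP m

-- Pre_ excludes exactly the inputs where Python A does not return: tamanho ≥ len(lista)
-- raises IndexError, and a negative reconstructed product makes A's final while-loop
-- (resultado //= 10 on a negative resultado) run forever.
def Pre_solveThis (numero_em_questao : Int) (lista_resultado : List Int) (tamanho : Int) : Prop :=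
  tamanho < (lista_resultado.length : Int) ∧
  0 ≤ numero_em_questao * pvS lista_resultado (tamanho + 1).toNat
instance (numero_em_questao : Int) (lista_resultado : List Int) (tamanho : Int) : Decidable (Pre_solveThis numero_em_questao lista_resultado tamanho) := by unfold Pre_solveThis; infer_instance

def pvWitness_solveThis : Int × List Int × Int := (3, [2, 1], 1)

def Spec_solveThis (numero_em_questao : Int) (lista_resultado : List Int) (tamanho : Int) (out : Int) : Prop := out = solveThis_alt numero_em_questao lista_resultado tamanho
instance (numero_em_questao : Int) (lista_resultado : List Int) (tamanho : Int) (out : Int) : Decidable (Spec_solveThis numero_em_questao lista_resultado tamanho out) := by unfold Spec_solveThis; infer_instance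

-- ===== CLAIM (what is proved, stated in full; the proofs are below) =====
def Claim_equal_solveThis : Prop := ∀ (numero_em_questao : Int) (lista_resultado : List Int) (tamanho : Int), Dom_solveThis numero_em_questao lista_resultado tamanho → Pre_solveThis numero_em_questao lista_resultado tamanho → Spec_solveThis numero_em_questao lista_resultado tamanho (solveThis numero_em_questao lista_resultado tamanho)

-- ===== LEMMAS AND PROOFS =====

theorem pvP_eq (m : Nat) : pvP m = 10 ^ m := by
  induction m with
  | zero => rfl
  | succ k ih => rw [pvP, ih, pow_succ]

theorem floordiv_pow_succ (x : Int) (k : Nat) :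
    PySem.Int.floordiv (PySem.Int.floordiv x (10 ^ k)) 10 = PySem.Int.floordiv x (10 ^ (k + 1)) := by
  rw [PySem.Int.floordiv_eq_ediv_of_pos (b := (10:Int) ^ k) (by positivity),
      PySem.Int.floordiv_eq_ediv_of_pos (by norm_num),
      PySem.Int.floordiv_eq_ediv_of_pos (b := (10:Int) ^ (k+1)) (by positivity),
      Int.ediv_ediv_of_nonneg (by positivity), pow_succ]

theorem floordiv_add_mul_pow (a b : Int) (k : Nat) :
    PySem.Int.floordiv (a + b * 10 ^ k) (10 ^ k) = PySem.Int.floordiv a (10 ^ k) + b := by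
  rw [PySem.Int.floordiv_eq_ediv_of_pos (b := (10:Int) ^ k) (by positivity),
      PySem.Int.floordiv_eq_ediv_of_pos (b := (10:Int) ^ k) (by positivity),
      Int.add_mul_ediv_right a b (by positivity)]

-- A's while loop computes counter + (number of digits _spread counts); the list arguments are dead
theorem carry_spread (N : Nat) : ∀ (r c : Int) (l l' : List Int), r.toNat ≤ N →
    carryLoopA r c l = c + spreadB r l' := by
  induction N with
  | zero =>
    intro r c l l' h
    rw [carryLoopA, spreadB]
    have : ¬ 0 < r := by omega
    simp [this]
  | succ n ih =>
    intro r c l l' h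
    rw [carryLoopA, spreadB]
    by_cases hr : 0 < r
    · simp only [hr, dif_pos]
      rw [ih _ _ _ (l' ++ [PySem.Int.mod r 10])
        (by
          have h10 : PySem.Int.floordiv r 10 = r / 10 := PySem.Int.floordiv_eq_ediv_of_pos (by norm_num)
          rw [h10]; omega)]
      ring
    · simp [hr]

theorem getD_set_ne (L : List Int) (m j : Nat) (v : Int) (h : m ≠ j) :
    (L.set m v).getD j 0 = L.getD j 0 := by
  simp [List.getD, List.getElem?_set_ne h]

-- invariant of A's for-loop
theorem foldA (n : Int) (l : List Int) (m : Nat) :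
    ((PySem.List.pyRange 0 (m : Int) 1).foldl
      (fun (st : Int × List Int × Int) c =>
        let op := PySem.List.pyGetD st.2.1 c 0 * n + st.1
        (PySem.Int.floordiv op 10,
         PySem.List.pySetD st.2.1 c (PySem.Int.mod op 10),
         st.2.2 + 1))
      (0, l, 0)).1 = PySem.Int.floordiv (n * pvS l m) (10 ^ m) ∧
    ((PySem.List.pyRange 0 (m : Int) 1).foldl
      (fun (st : Int × List Int × Int) c =>
        let op := PySem.List.pyGetD st.2.1 c 0 * n + st.1
        (PySem.Int.floordiv op 10,
         PySem.List.pySetD st.2.1 c (PySem.Int.mod op 10),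
         st.2.2 + 1))
      (0, l, 0)).2.2 = (m : Int) ∧
    ∀ j : Nat, m ≤ j →
      ((PySem.List.pyRange 0 (m : Int) 1).foldl
        (fun (st : Int × List Int × Int) c =>
          let op := PySem.List.pyGetD st.2.1 c 0 * n + st.1
          (PySem.Int.floordiv op 10,
           PySem.List.pySetD st.2.1 c (PySem.Int.mod op 10),
           st.2.2 + 1))
        (0, l, 0)).2.1.getD j 0 = l.getD j 0 := by
  induction m with
  | zero =>
    rw [PySem.List.pyRange_one_eq_nil (by norm_num)]
    refine ⟨?_, by simp, by simp⟩
    simp [pvS]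
  | succ k ih =>
    have hsplit : PySem.List.pyRange 0 ((k : Int) + 1) 1
        = PySem.List.pyRange 0 (k : Int) 1 ++ [(k : Int)] :=
      PySem.List.pyRange_one_succ_right (by omega)
    have hcast : ((k + 1 : Nat) : Int) = (k : Int) + 1 := by push_cast; ring
    rw [hcast, hsplit, List.foldl_append]
    obtain ⟨h1, h2, h3⟩ := ih
    simp only [List.foldl_cons, List.foldl_nil]
    set L := ((PySem.List.pyRange 0 (k : Int) 1).foldl
      (fun (st : Int × List Int × Int) c =>
        let op := PySem.List.pyGetD st.2.1 c 0 * n + st.1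
        (PySem.Int.floordiv op 10,
         PySem.List.pySetD st.2.1 c (PySem.Int.mod op 10),
         st.2.2 + 1))
      (0, l, 0)) with hL
    have hread : PySem.List.pyGetD L.2.1 (k : Int) 0 = l.getD k 0 := by
      rw [PySem.List.pyGetD_natCast]; exact h3 k le_rfl
    refine ⟨?_, ?_, ?_⟩
    · show PySem.Int.floordiv (PySem.List.pyGetD L.2.1 (k : Int) 0 * n + L.1) 10
          = PySem.Int.floordiv (n * pvS l (k + 1)) (10 ^ (k + 1))
      rw [hread, h1]
      have hS : n * pvS l (k + 1) = n * pvS l k + (l.getD k 0 * n) * 10 ^ k := by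
        rw [pvS, pvP_eq]; ring
      rw [hS, ← floordiv_pow_succ, floordiv_add_mul_pow]
      ring_nf
    · show L.2.2 + 1 = (k : Int) + 1
      rw [h2]
    · intro j hj
      show (PySem.List.pySetD L.2.1 (k : Int) (PySem.Int.mod (PySem.List.pyGetD L.2.1 (k : Int) 0 * n + L.1) 10)).getD j 0 = l.getD j 0
      rw [PySem.List.pySetD_natCast, getD_set_ne _ _ _ _ (by omega)]
      exact h3 j (by omega)

-- head-recursive value of a digit list (proof-side bridge to pvS)
def pvS0 : List Int → Int
  | [] => 0
  | x :: xs => x + 10 * pvS0 xs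

theorem pvS_nil (m : Nat) : pvS [] m = 0 := by
  induction m with
  | zero => rfl
  | succ k ih => rw [pvS, ih]; simp

theorem pvS_cons (x : Int) (l : List Int) (m : Nat) :
    pvS (x :: l) (m + 1) = x + 10 * pvS l m := by
  induction m with
  | zero => simp [pvS, pvP]
  | succ k ih =>
    rw [pvS, ih, pvS]
    show _ = x + 10 * (pvS l k + l.getD k 0 * pvP k)
    have : (x :: l).getD (k + 1) 0 = l.getD k 0 := by simp [List.getD]
    rw [this, pvP]
    ring

theorem pvS0_take (m : Nat) : ∀ (l : List Int), pvS0 (l.take m) = pvS l m := by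
  induction m with
  | zero => intro l; simp [pvS0, pvS]
  | succ k ih =>
    intro l
    cases l with
    | nil => simp [pvS0, pvS_nil]
    | cons x xs => rw [List.take_succ_cons, pvS0, ih, pvS_cons]

-- B's comprehension sum over enumerate(xs, s) evaluates the digit polynomial shifted by 10^s
theorem enumSum (xs : List Int) : ∀ (s : Nat) (acc : Int),
    (PySem.List.enumerate xs (s : Int)).foldl (fun acc p => acc + p.2 * 10 ^ p.1.toNat) acc
      = acc + 10 ^ s * pvS0 xs := by
  induction xs with
  | nil => intro s acc; simp [PySem.List.enumerate_nil, pvS0]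
  | cons x l ih =>
    intro s acc
    rw [PySem.List.enumerate_cons, List.foldl_cons]
    have hcast : (s : Int) + 1 = ((s + 1 : Nat) : Int) := by push_cast; ring
    rw [hcast, ih (s + 1)]
    have hts : ((s : Int)).toNat = s := Int.toNat_natCast s
    rw [hts, pvS0, pow_succ]
    ring

-- ===== VERDICT (by name: the statement is the Claim_ definition above) =====
theorem solveThis_spec : Claim_equal_solveThis := by
  intro n l t _ _
  unfold Spec_solveThis solveThis solveThis_alt mainLoopA
  have hsp0 : ∀ l' : List Int, spreadB 0 l' = 0 := by
    intro l'; rw [spreadB]; simp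
  by_cases ht : 0 ≤ t
  · -- main case: n = t+1, both sides divide the same product by 10^(t+1)
    set m : Nat := t.toNat + 1 with hm
    have htm : t + 1 = (m : Int) := by omega
    obtain ⟨hA1, hA2, _⟩ := foldA n l m
    rw [htm, hA1, hA2]
    have hmx : max ((m : Nat) : Int) 0 = ((m : Nat) : Int) := by omega
    have hsl : PySem.List.slice l none (some ((m : Nat) : Int)) = List.take m l := by
      rw [PySem.List.slice_to l (by omega)]; simp
    simp only [hmx, Int.toNat_natCast, hsl]
    have hes : (PySem.List.enumerate (List.take m l) 0).foldl
        (fun acc p => acc + p.2 * 10 ^ p.1.toNat) 0 = pvS l m := by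
      have h := enumSum (l.take m) 0 0
      simpa [pvS0_take] using h
    simp only [hes]
    rw [carry_spread (PySem.Int.floordiv (n * pvS l m) (10 ^ m)).toNat _ _ _ _ le_rfl]
  · -- tamanho < 0: every loop body is skipped, both sides return -1
    have hmax : max (t + 1) 0 = 0 := by omega
    rw [PySem.List.pyRange_one_eq_nil (a := 0) (b := t + 1) (by omega)]
    simp only [List.foldl_nil, hmax]
    have hsl : PySem.List.slice l none (some (0 : Int)) = ([] : List Int) := by
      rw [PySem.List.slice_to l le_rfl]; simp
    have hca : carryLoopA 0 0 l = 0 := by rw [carryLoopA]; simp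
    simp [hsl, hca, hsp0]
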